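-- pv_equiv track=rewrite | github.com/lazydrupi/ail-feeder-ct | bin/feeder_ct.py | deleteHead
-- ===== SOURCE A (Python) =====
-- def deleteHead(domain):
--     if domain.split(".")[0] == "*" or domain.split(".")[0] == "www":
--         locDomain = ""
--         for element in domain.split(".")[1:]:
--             locDomain += element + "."
--
--         locDomain = locDomain[:-1].rstrip("\n")
--
--         return locDomain
--     return domain
-- ===== SOURCE B (Python) =====
-- def deleteHead(domain):
--     head, _sep, tail = domain.partition(".")
--     if head in ("*", "www"):
--         return tail.rstrip("\n")
--     return domain
-- ===== Notes on version B (the rewrite author's own statement) =====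
-- stated objective: idiomatic
-- what changed: Replaces A's double split, list slicing and manual rejoin-with-dots loop (plus trailing-dot removal) by a single str.partition at the first dot whose tail is returned directly.
import Mathlib
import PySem

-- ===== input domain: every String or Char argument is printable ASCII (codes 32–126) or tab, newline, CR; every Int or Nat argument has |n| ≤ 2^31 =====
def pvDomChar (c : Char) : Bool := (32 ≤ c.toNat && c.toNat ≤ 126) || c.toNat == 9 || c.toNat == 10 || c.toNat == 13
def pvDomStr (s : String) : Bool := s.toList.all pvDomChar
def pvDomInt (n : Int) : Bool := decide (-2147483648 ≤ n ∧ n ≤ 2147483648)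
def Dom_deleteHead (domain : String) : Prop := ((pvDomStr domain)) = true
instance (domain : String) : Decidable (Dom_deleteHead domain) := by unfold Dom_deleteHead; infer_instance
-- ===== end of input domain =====

-- B replaces A's double split('.'), slice and manual rejoin-with-dots loop by a single partition at the first '.'.

-- exact port of s.rstrip("\n") for this single-character chars argument (no PySem primitive takes a chars set on one side)
def rstripNl (s : List Char) : List Char := (s.reverse.dropWhile (· == '\n')).reverse

-- ===== PORT A =====
def deleteHead (domain : String) : String :=
  -- parts = domain.split("."); always nonempty, so parts[0] is headD
  let parts := PySem.Chars.splitOn domain.toList ['.']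
  if parts.headD [] = ['*'] ∨ parts.headD [] = ['w','w','w'] then
    -- locDomain = "" ; for element in parts[1:]: locDomain += element + "."
    let loc := (PySem.List.slice parts (some 1) none).foldl (fun acc e => acc ++ e ++ ['.']) []
    -- locDomain = locDomain[:-1].rstrip("\n")
    String.ofList (rstripNl (PySem.List.slice loc none (some (-1))))
  else domain

-- ===== PORT B =====
-- exact port of domain.partition(".") for the single-char separator: (head, sep, tail), sep = [] iff no '.'
def partDot : List Char → List Char × List Char × List Char
  | [] => ([], [], [])
  | c :: rest =>
    if c = '.' then ([], ['.'], rest)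
    else
      let r := partDot rest
      (c :: r.1, r.2.1, r.2.2)

def deleteHead_alt (domain : String) : String :=
  let p := partDot domain.toList
  if p.1 = ['*'] ∨ p.1 = ['w','w','w'] then String.ofList (rstripNl p.2.2)
  else domain

-- ===== PRECONDITION & SPEC =====
def Spec_deleteHead (domain : String) (out : String) : Prop := out = deleteHead_alt domain
instance (domain : String) (out : String) : Decidable (Spec_deleteHead domain out) := by unfold Spec_deleteHead; infer_instance

-- ===== CLAIM (what is proved, stated in full; the proofs are below) =====
def Claim_equal_deleteHead : Prop := ∀ (domain : String), Dom_deleteHead domain → Spec_deleteHead domain (deleteHead domain)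

-- ===== LEMMAS AND PROOFS =====

-- simple structural recursion computing split(".") on a list of chars (proof-side model of splitOn)
def splitDot : List Char → List (List Char)
  | [] => [[]]
  | c :: rest =>
    if c = '.' then [] :: splitDot rest
    else
      match splitDot rest with
      | [] => []
      | p :: ps => (c :: p) :: ps

theorem splitDot_ne_nil (cs : List Char) : splitDot cs ≠ [] := by
  induction cs with
  | nil => simp [splitDot]
  | cons c rest ih =>
    simp only [splitDot]
    split
    · simp
    · cases h : splitDot rest with
      | nil => exact absurd h ih
      | cons p ps => simp

theorem go_eq_splitDot (fuel : Nat) (l cur : List Char) (acc : List (List Char))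
    (hf : l.length < fuel) :
    PySem.Chars.splitOn.go ['.'] fuel l cur acc =
      acc.reverse ++ (match splitDot l with
        | [] => []
        | p :: ps => (cur.reverse ++ p) :: ps) := by
  induction fuel generalizing l cur acc with
  | zero => omega
  | succ fuel ih =>
    cases l with
    | nil =>
      simp [PySem.Chars.splitOn.go, splitDot]
    | cons c rest =>
      by_cases hc : c = '.'
      · subst hc
        have hpre : List.isPrefixOf ['.'] ('.' :: rest) = true := by
          simp [List.isPrefixOf]
        rw [PySem.Chars.splitOn.go]
        simp only [hpre, if_true, List.length_singleton, List.drop_succ_cons, List.drop_zero]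
        rw [ih rest [] ((cur.reverse) :: acc) (by simpa using Nat.lt_of_succ_lt_succ hf)]
        simp only [splitDot]
        cases h : splitDot rest with
        | nil => exact absurd h (splitDot_ne_nil rest)
        | cons p ps => simp
      · have hpre : List.isPrefixOf ['.'] (c :: rest) = false := by
          simp [List.isPrefixOf]
          intro h; exact hc h.symm
        rw [PySem.Chars.splitOn.go]
        simp only [hpre, Bool.false_eq_true, if_false]
        rw [ih rest (c :: cur) acc (by simpa using Nat.lt_of_succ_lt_succ hf)]
        simp only [splitDot, if_neg hc]
        cases h : splitDot rest with
        | nil => exact absurd h (splitDot_ne_nil rest)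
        | cons p ps => simp

theorem splitOn_eq_splitDot (cs : List Char) :
    PySem.Chars.splitOn cs ['.'] = splitDot cs := by
  rw [PySem.Chars.splitOn, go_eq_splitDot (cs.length + 1) cs [] [] (by omega)]
  cases h : splitDot cs with
  | nil => exact absurd h (splitDot_ne_nil cs)
  | cons p ps => simp

theorem splitDot_head (cs : List Char) :
    (splitDot cs).headD [] = (partDot cs).1 := by
  induction cs with
  | nil => simp [splitDot, partDot]
  | cons c rest ih =>
    simp only [splitDot, partDot]
    split
    · simp
    · cases h : splitDot rest with
      | nil => exact absurd h (splitDot_ne_nil rest)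
      | cons p ps => simp [h] at ih ⊢; exact ih

theorem splitDot_tail (cs : List Char) :
    (splitDot cs).tail =
      (if (partDot cs).2.1 = [] then [] else splitDot (partDot cs).2.2) := by
  induction cs with
  | nil => simp [splitDot, partDot]
  | cons c rest ih =>
    simp only [splitDot, partDot]
    split
    · simp
    · cases h : splitDot rest with
      | nil => exact absurd h (splitDot_ne_nil rest)
      | cons p ps => simp [h] at ih ⊢; exact ih

theorem partDot_no_sep (cs : List Char) (h : (partDot cs).2.1 = []) :
    (partDot cs).2.2 = [] := by
  induction cs with
  | nil => simp [partDot]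
  | cons c rest ih =>
    simp only [partDot] at h ⊢
    split at h
    · simp at h
    · simp only at h ⊢
      split
      · simp_all
      · exact ih h

theorem foldJoin (cs : List Char) (init : List Char) :
    (splitDot cs).foldl (fun acc e => acc ++ e ++ ['.']) init = init ++ cs ++ ['.'] := by
  induction cs generalizing init with
  | nil => simp [splitDot]
  | cons c rest ih =>
    simp only [splitDot]
    split
    · rename_i hc
      subst hc
      simp only [List.foldl_cons, List.append_nil]
      rw [ih]
      simp
    · cases h : splitDot rest with
      | nil => exact absurd h (splitDot_ne_nil rest)
      | cons p ps =>
        simp only [List.foldl_cons]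
        have := ih (init := init ++ [c])
        rw [h] at this
        simp only [List.foldl_cons] at this
        have harr : init ++ (c :: p) ++ ['.'] = init ++ [c] ++ p ++ ['.'] := by simp
        rw [harr, this]
        simp

-- ===== VERDICT (by name: the statement is the Claim_ definition above) =====
theorem deleteHead_spec : Claim_equal_deleteHead := by
  intro domain _
  unfold Spec_deleteHead deleteHead deleteHead_alt
  simp only [splitOn_eq_splitDot, splitDot_head, PySem.List.slice_from_one,
    PySem.List.slice_to_neg_one]
  split
  · rw [splitDot_tail]
    by_cases hs : (partDot domain.toList).2.1 = []
    · rw [if_pos hs, partDot_no_sep _ hs]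
      simp [rstripNl]
    · rw [if_neg hs, foldJoin]
      simp
  · rfl
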